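-- pv_equiv track=rewrite | github.com/KurochkinVadim/nn_generation_image | main/net.py | main_colors
-- ===== SOURCE A (Python) =====
-- from collections import Counter
--
-- def main_colors(tags, groups):
--     """
--     The function determines the primary and secondary color based on the input tags
--
--     Parameters
--     __________
--     tags : list
--         Tags at the entrance
--     groups : dict
--         Dictionary of matching tags and colors
--
--     Returns
--     _______
--     main_color : str
--         Main color
--     second_color : str
--         Second color
--     distance : int
--         The distance between colors on the palette
--
--     """
--
--     colors = ['Red', 'Pink', 'Blue', 'Cyan', 'Green', 'Yellow']
--     new_tags = []
--     for tag in tags: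
--         for color in groups:
--             if tag in groups[color]:
--                 new_tags.append(color)
--     counter = list(Counter(new_tags).most_common(6))
--     main_color = counter[0][0]
--     if len(counter) == 1:
--         return main_color, main_color, 0
--     for i in range(1, len(counter)):
--         second_color = counter[i][0]
--         distance = abs(colors.index(main_color) - colors.index(second_color))
--         if distance == 2 or distance == 4:
--             return main_color, second_color, 2
--         if distance == 1 or distance == 5:
--             return main_color, second_color, 1
--     return main_color, main_color, 0
-- ===== SOURCE B (Python) =====
-- def main_colors(tags, groups):
--     colors = ['Red', 'Pink', 'Blue', 'Cyan', 'Green', 'Yellow']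
--     # reverse index: tag -> list of colors whose group contains it (colors in dict order)
--     index = {}
--     for color, members in groups.items():
--         for t in dict.fromkeys(members):
--             index.setdefault(t, []).append(color)
--     # single pass over tags, counting colors (dict keeps first-insertion order)
--     cnt = {}
--     for tag in tags:
--         for c in index.get(tag, []):
--             cnt[c] = cnt.get(c, 0) + 1
--     ranking = sorted(cnt.items(), key=lambda kv: -kv[1])
--     main_color = ranking[0][0]
--     dist_map = {1: 1, 2: 2, 4: 2, 5: 1}
--     for second_color, _ in ranking[1:]:
--         d = dist_map.get(abs(colors.index(main_color) - colors.index(second_color)))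
--         if d is not None:
--             return main_color, second_color, d
--     return main_color, main_color, 0
-- ===== Notes on version B (the rewrite author's own statement) =====
-- stated objective: alternative
-- what changed: B precomputes a reverse index tag->colors once and counts colors in a single pass over tags (A rescans every group for every tag), then sorts the counts by negated count and resolves the palette distance through a lookup table instead of A's if-chain.
import Mathlib
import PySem

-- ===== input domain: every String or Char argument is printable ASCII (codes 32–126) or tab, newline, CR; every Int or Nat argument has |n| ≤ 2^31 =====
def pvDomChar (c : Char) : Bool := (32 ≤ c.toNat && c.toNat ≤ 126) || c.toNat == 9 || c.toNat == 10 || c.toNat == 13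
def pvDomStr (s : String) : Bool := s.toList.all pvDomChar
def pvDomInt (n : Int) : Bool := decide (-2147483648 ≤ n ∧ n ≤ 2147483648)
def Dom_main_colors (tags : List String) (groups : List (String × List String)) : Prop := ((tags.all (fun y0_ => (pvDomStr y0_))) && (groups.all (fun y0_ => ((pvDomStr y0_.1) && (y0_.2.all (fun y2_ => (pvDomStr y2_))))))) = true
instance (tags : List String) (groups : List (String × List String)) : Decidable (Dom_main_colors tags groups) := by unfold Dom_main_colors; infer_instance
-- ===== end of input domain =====

-- B replaces A's rescan of every group for every tag by a reverse index tag → colors and one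
-- counting pass over the tags, a negated-count sort key, and a lookup table for the palette
-- distance.

-- ===== PORT A =====
-- the palette list both Python versions hard-code
def pvColors : List String := ["Red", "Pink", "Blue", "Cyan", "Green", "Yellow"]

-- colors.index(c); the default 0 is never used under Pre_ (Python raises ValueError there)
def pvIdx (c : String) : Int := ((PySem.List.index? pvColors c).getD 0 : Int)

-- A's final loop 'for i in range(1, len(counter))'
def scanA (mc : String) : List (String × Int) → String × String × Int
  | [] => (mc, mc, 0)
  | (sc, _) :: rest =>
    let distance := |pvIdx mc - pvIdx sc|
    if distance = 2 ∨ distance = 4 then (mc, sc, 2)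
    else if distance = 1 ∨ distance = 5 then (mc, sc, 1)
    else scanA mc rest

-- new_tags: for each tag, scan the whole dict and append every matching color
def pvNewTags (tags : List String) (groups : List (String × List String)) : List String :=
  tags.foldl (fun acc tag =>
    (PySem.Dict.mk groups).keys.foldl (fun acc color =>
      if ((PySem.Dict.mk groups).getD color []).contains tag then acc ++ [color] else acc) acc) []

def main_colors (tags : List String) (groups : List (String × List String)) : String × String × Int :=
  match (PySem.List.sorted (PySem.Dict.counter (pvNewTags tags groups)).items
      (fun kv => kv.2) true).take 6 with
  | [] => ("", "", 0)  -- counter[0][0] is an IndexError in Python; excluded by Pre_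
  | (mc, _) :: rest =>
    if rest.length + 1 = 1 then (mc, mc, 0) else scanA mc rest

-- ===== PORT B =====
-- dist_map.get(d)
def pvDistGet (d : Int) : Option Int :=
  (PySem.Dict.ofList [((1 : Int), (1 : Int)), (2, 2), (4, 2), (5, 1)]).get? d

-- B's final loop over ranking[1:]
def scanB (mc : String) : List (String × Int) → String × String × Int
  | [] => (mc, mc, 0)
  | (sc, _) :: rest =>
    match pvDistGet |pvIdx mc - pvIdx sc| with
    | some v => (mc, sc, v)
    | none => scanB mc rest

-- reverse index tag -> list of colors, built once
def pvIndex (groups : List (String × List String)) : PySem.Dict String (List String) :=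
  groups.foldl (fun d p =>
    (PySem.List.dedup p.2).foldl (fun d t => d.modify t [] (· ++ [p.1])) d) PySem.Dict.empty

-- one counting pass over the tags
def pvCnt (tags : List String) (groups : List (String × List String)) : PySem.Dict String Int :=
  tags.foldl (fun d tag =>
    ((pvIndex groups).getD tag []).foldl (fun d c => d.modify c 0 (· + 1)) d) PySem.Dict.empty

def main_colors_alt (tags : List String) (groups : List (String × List String)) : String × String × Int :=
  match PySem.List.sorted (pvCnt tags groups).items (fun kv => -kv.2) false with
  | [] => ("", "", 0)  -- ranking[0][0] is an IndexError in Python; excluded by Pre_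
  | (mc, _) :: rest => scanB mc rest

-- ===== PRECONDITION & SPEC =====
-- Pre_ excludes inputs where A raises (no tag matches any group: IndexError; two or more distinct
-- matched color keys with one outside the six-color palette: the scan's colors.index raises
-- ValueError) and, with them, the corner where a matched non-palette key happens to be shadowed by
-- an early return; duplicate keys are excluded because 'groups' stands for a Python dict, which
-- cannot hold them.
def Pre_main_colors (tags : List String) (groups : List (String × List String)) : Prop :=
  (groups.map Prod.fst).Nodup ∧
  (∃ t ∈ tags, ∃ p ∈ groups, t ∈ p.2) ∧
  ((PySem.List.dedup ((groups.filter (fun p => decide (∃ t ∈ tags, t ∈ p.2))).map Prod.fst)).length ≤ 1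
    ∨ (∀ p ∈ groups, (∃ t ∈ tags, t ∈ p.2) → p.1 ∈ pvColors))
instance (tags : List String) (groups : List (String × List String)) : Decidable (Pre_main_colors tags groups) := by unfold Pre_main_colors; infer_instance

def pvWitness_main_colors : List String × (List (String × List String)) :=
  (["a"], [("Red", ["a"])])

def Spec_main_colors (tags : List String) (groups : List (String × List String)) (out : String × String × Int) : Prop := out = main_colors_alt tags groups
instance (tags : List String) (groups : List (String × List String)) (out : String × String × Int) : Decidable (Spec_main_colors tags groups out) := by unfold Spec_main_colors; infer_instance

-- ===== CLAIM (what is proved, stated in full; the proofs are below) =====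
def Claim_equal_main_colors : Prop := ∀ (tags : List String) (groups : List (String × List String)), Dom_main_colors tags groups → Pre_main_colors tags groups → Spec_main_colors tags groups (main_colors tags groups)

-- ===== LEMMAS AND PROOFS =====

-- per-tag list of matching colors, in dict order
def pvL (groups : List (String × List String)) (tag : String) : List String :=
  (groups.filter (fun q => q.2.contains tag)).map Prod.fst

theorem pv_find_pair {groups : List (String × List String)}
    (hnd : (groups.map Prod.fst).Nodup) {p : String × List String} (hp : p ∈ groups) :
    List.find? (fun q => q.1 == p.1) groups = some p := by
  induction groups with
  | nil => simp at hp
  | cons a tl ih =>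
    simp only [List.map_cons, List.nodup_cons] at hnd
    rcases List.mem_cons.1 hp with h | h
    · subst h; simp [List.find?]
    · have hne : ¬ (a.1 == p.1) = true := by
        simp only [beq_iff_eq]
        intro he
        exact hnd.1 (he ▸ (List.mem_map.2 ⟨p, h, rfl⟩))
      simp [List.find?, hne, ih hnd.2 h]

theorem pv_newTags_eq (tags : List String) (groups : List (String × List String))
    (hnd : (groups.map Prod.fst).Nodup) :
    pvNewTags tags groups = tags.flatMap (pvL groups) := by
  unfold pvNewTags
  have inner : ∀ (tag : String) (acc : List String),
      (PySem.Dict.mk groups).keys.foldl (fun acc color =>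
        if ((PySem.Dict.mk groups).getD color []).contains tag then acc ++ [color] else acc) acc
      = acc ++ pvL groups tag := by
    intro tag acc
    have hk : (PySem.Dict.mk groups).keys = groups.map Prod.fst := by
      simp [PySem.Dict.keys]
    rw [hk, List.foldl_map]
    have hcongr : (groups.foldl (fun acc p =>
        if ((PySem.Dict.mk groups).getD p.1 []).contains tag then acc ++ [p.1] else acc) acc)
        = groups.foldl (fun acc p => if p.2.contains tag then acc ++ [p.1] else acc) acc := by
      apply PySem.List.foldl_congr_mem
      intro a p hp
      have : (PySem.Dict.mk groups).getD p.1 [] = p.2 := by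
        simp [PySem.Dict.getD, PySem.Dict.get?, pv_find_pair hnd hp]
      rw [this]
    rw [hcongr]
    exact PySem.List.foldl_append_if (fun q => q.2.contains tag) Prod.fst groups acc
  have outer : ∀ (ts : List String) (acc : List String),
      ts.foldl (fun acc tag =>
        (PySem.Dict.mk groups).keys.foldl (fun acc color =>
          if ((PySem.Dict.mk groups).getD color []).contains tag then acc ++ [color] else acc) acc) acc
      = acc ++ ts.flatMap (pvL groups) := by
    intro ts
    induction ts with
    | nil => simp
    | cons t tl ih =>
      intro acc
      rw [List.foldl_cons, inner t acc, ih, List.flatMap_cons, List.append_assoc]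
  have := outer tags []
  rw [List.nil_append] at this
  exact this

theorem pv_inner_index (l : List String) (hl : l.Nodup) (c : String) :
    ∀ (d : PySem.Dict String (List String)) (t : String),
    (l.foldl (fun d t => d.modify t [] (· ++ [c])) d).getD t []
      = d.getD t [] ++ (if t ∈ l then [c] else []) := by
  induction l with
  | nil => intro d t; simp
  | cons x xs ih =>
    intro d t
    simp only [List.nodup_cons] at hl
    rw [List.foldl_cons, ih hl.2]
    by_cases hx : t = x
    · subst hx
      rw [if_neg hl.1, if_pos (List.mem_cons_self ..)]
      simp [PySem.Dict.modify]
    · have : (d.modify x [] (· ++ [c])).getD t [] = d.getD t [] := by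
        simp [PySem.Dict.modify, PySem.Dict.getD_insert, hx]
      rw [this]
      by_cases hm : t ∈ xs
      · rw [if_pos hm, if_pos (List.mem_cons_of_mem _ hm)]
      · rw [if_neg hm, if_neg (by simp [hx, hm])]

theorem pv_index_getD (groups : List (String × List String)) (t : String) :
    (pvIndex groups).getD t [] = pvL groups t := by
  unfold pvIndex
  suffices h : ∀ (g : List (String × List String)) (d : PySem.Dict String (List String)),
      (g.foldl (fun d p =>
        (PySem.List.dedup p.2).foldl (fun d t => d.modify t [] (· ++ [p.1])) d) d).getD t []
      = d.getD t [] ++ pvL g t by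
    have := h groups PySem.Dict.empty
    simpa [PySem.Dict.getD, PySem.Dict.get?, PySem.Dict.empty] using this
  intro g
  induction g with
  | nil => intro d; simp [pvL]
  | cons p ps ih =>
    intro d
    rw [List.foldl_cons, ih]
    rw [pv_inner_index _ (PySem.List.nodup_dedup p.2) p.1 d t]
    have hm : (t ∈ PySem.List.dedup p.2) ↔ (p.2.contains t = true) := by
      rw [PySem.List.mem_dedup]; simp
    simp only [pvL, List.filter_cons]
    by_cases hc : p.2.contains t = true
    · rw [if_pos (hm.2 hc)]
      simp [List.append_assoc]
      rw [if_pos (show t ∈ p.2 by simpa using hc)]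
      simp
    · rw [if_neg (fun h => hc (hm.1 h))]
      simp
      rw [if_neg (show ¬ t ∈ p.2 by simpa using hc)]

theorem pv_cnt_eq (tags : List String) (groups : List (String × List String)) :
    pvCnt tags groups = PySem.Dict.counter (tags.flatMap (pvL groups)) := by
  have h1 : pvCnt tags groups
      = tags.foldl (fun d tag =>
        (pvL groups tag).foldl (fun d c => d.modify c 0 (· + 1)) d) PySem.Dict.empty := by
    unfold pvCnt
    apply PySem.List.foldl_congr_mem
    intro d tag _
    rw [pv_index_getD]
  have h2 : PySem.Dict.counter (tags.flatMap (pvL groups))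
      = tags.foldl (fun d tag =>
        (pvL groups tag).foldl (fun d c => d.modify c 0 (· + 1)) d) PySem.Dict.empty := by
    rw [PySem.Dict.counter, List.foldl_flatMap]
  rw [h1, h2]

theorem pv_sorted_neg (xs : List (String × Int)) :
    PySem.List.sorted xs (fun kv => -kv.2) false = PySem.List.sorted xs (fun kv => kv.2) true := by
  show xs.foldl (fun acc x => PySem.List.insertBy (fun a b => decide ((fun kv : String × Int => -kv.2) a < (fun kv : String × Int => -kv.2) b)) x acc) []
      = xs.foldl (fun acc x => PySem.List.insertBy (fun a b => decide ((fun kv : String × Int => kv.2) b < (fun kv : String × Int => kv.2) a)) x acc) []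
  have : (fun (a b : String × Int) => decide (-a.2 < -b.2)) = (fun (a b : String × Int) => decide (b.2 < a.2)) := by
    funext a b; simp
  rw [this]

theorem pv_distGet (d : Int) : pvDistGet d =
    (if d = 1 then some 1 else if d = 2 then some 2 else if d = 4 then some 2 else if d = 5 then some 1 else none) := by
  have hitems : (PySem.Dict.ofList [((1 : Int), (1 : Int)), (2, 2), (4, 2), (5, 1)]).items
      = [((1 : Int), (1 : Int)), (2, 2), (4, 2), (5, 1)] := by decide
  simp only [pvDistGet, PySem.Dict.get?, hitems, List.find?]
  have e : ∀ k : Int, ¬ d = k → (k == d) = false := by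
    intro k hk; exact beq_eq_false_iff_ne.2 (Ne.symm hk)
  by_cases h1 : d = 1 <;> by_cases h2 : d = 2 <;> by_cases h4 : d = 4 <;> by_cases h5 : d = 5 <;>
    first
      | (subst h1; simp)
      | (subst h2; simp [e 1 (by omega)])
      | (subst h4; simp [e 1 (by omega), e 2 (by omega)])
      | (subst h5; simp [e 1 (by omega), e 2 (by omega), e 4 (by omega)])
      | simp [e 1 h1, e 2 h2, e 4 h4, e 5 h5, h1, h2, h4, h5]

theorem pv_scan_eq (mc : String) (rest : List (String × Int)) :
    scanA mc rest = scanB mc rest := by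
  induction rest with
  | nil => rfl
  | cons x xs ih =>
    obtain ⟨sc, n⟩ := x
    rw [scanA, scanB, pv_distGet]
    set d := |pvIdx mc - pvIdx sc| with hd
    by_cases h1 : d = 1 <;> by_cases h2 : d = 2 <;> by_cases h4 : d = 4 <;> by_cases h5 : d = 5 <;>
      simp [h1, h2, h4, h5, ih]

theorem pv_take6 (tags : List String) (groups : List (String × List String))
    (hpal : (PySem.List.dedup ((groups.filter
        (fun p => decide (∃ t ∈ tags, t ∈ p.2))).map Prod.fst)).length ≤ 1
      ∨ (∀ p ∈ groups, (∃ t ∈ tags, t ∈ p.2) → p.1 ∈ pvColors)) :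
    (PySem.List.sorted (PySem.Dict.counter (tags.flatMap (pvL groups))).items
        (fun kv : String × Int => kv.2) true).take 6
    = PySem.List.sorted (PySem.Dict.counter (tags.flatMap (pvL groups))).items
        (fun kv : String × Int => kv.2) true := by
  apply List.take_of_length_le
  rw [PySem.List.length_sorted, PySem.Dict.items_counter, List.length_map]
  have hnodup := PySem.Set.nodup_ofList (tags.flatMap (pvL groups))
  rcases hpal with h1 | hpal
  · -- at most one distinct matched color: the counter has at most one key
    have hsub : PySem.Set.ofList (tags.flatMap (pvL groups))
        ⊆ PySem.List.dedup ((groups.filter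
          (fun p => decide (∃ t ∈ tags, t ∈ p.2))).map Prod.fst) := by
      intro x hx
      rw [PySem.Set.mem_ofList] at hx
      obtain ⟨t, ht, hxt⟩ := List.mem_flatMap.1 hx
      obtain ⟨p, hp, hfst⟩ := List.mem_map.1 hxt
      have hp' := List.mem_filter.1 hp
      rw [PySem.List.mem_dedup]
      exact List.mem_map.2 ⟨p, List.mem_filter.2 ⟨hp'.1,
        by simpa using ⟨t, ht, by simpa using hp'.2⟩⟩, hfst⟩
    have := (hnodup.subperm hsub).length_le
    omega
  · have hsub : PySem.Set.ofList (tags.flatMap (pvL groups)) ⊆ pvColors := by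
      intro x hx
      rw [PySem.Set.mem_ofList] at hx
      obtain ⟨t, ht, hxt⟩ := List.mem_flatMap.1 hx
      obtain ⟨p, hp, hfst⟩ := List.mem_map.1 hxt
      have hp' := List.mem_filter.1 hp
      exact hfst ▸ hpal p hp'.1 ⟨t, ht, by simpa using hp'.2⟩
    have := (hnodup.subperm hsub).length_le
    simpa using this

-- ===== VERDICT (by name: the statement is the Claim_ definition above) =====
theorem main_colors_spec : Claim_equal_main_colors := by
  intro tags groups _ hpre
  obtain ⟨hnd, -, hpal⟩ := hpre
  unfold Spec_main_colors main_colors main_colors_alt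
  rw [pv_newTags_eq tags groups hnd, pv_cnt_eq tags groups, pv_sorted_neg,
    pv_take6 tags groups hpal]
  cases h : PySem.List.sorted (PySem.Dict.counter (tags.flatMap (pvL groups))).items
      (fun kv : String × Int => kv.2) true with
  | nil => rfl
  | cons hd tl =>
    obtain ⟨mc, n⟩ := hd
    cases tl with
    | nil => rfl
    | cons b bs => simpa using pv_scan_eq mc (b :: bs)
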